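-- pv_equiv track=rewrite | github.com/skyeoh/dna-toolkit | dna_toolkit.py | calculateGCContentEqualSubseq
-- ===== SOURCE A (Python) =====
-- def calculateGCContent(seq, start=None, end=None):
--     """
--     Calculate GC content of DNA or RNA string,
--     i.e. percentage of bases that are Guanine
--     or Cytosine.
--
--     Args:
--         seq (str): DNA or RNA string
--         start (int) [Optional]: index within seq where calculation starts
--         end (int) [Optional]: index within seq where calculation ends
--
--     Returns:
--         GC content of seq or segment of seq defined by start and end (float)
--     """
--     return round((seq.count("G", start, end) + seq.count("C", start, end)) / len(seq[start:end]) * 100)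
--
-- def calculateGCContentEqualSubseq(seq, k=10):
--     """
--     Calculate GC content of subsequences of DNA or RNA string
--     that are of equal length.
--
--     Args:
--         seq (str): DNA or RNA string
--         k (int) [Optional]: length of subsequence (default value = 10)
--
--     Returns:
--         GC content of each subsequence (list)
--         If last subsequence is shorter than k, last entry
--         is simply GC content of that subsequence.
--     """
--     subseqGCContent = []
--     front = 0
--     seqLen = len(seq)
--     while front < seqLen:
--         end = front + k
--         if end >= seqLen:
--             end = seqLen
--         subseqGCContent.append(calculateGCContent(seq, front, end))
--         front += k
--     return subseqGCContent
-- ===== SOURCE B (Python) =====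
-- def calculateGCContentEqualSubseq(seq, k=10):
--     # One pass builds a prefix array of G/C counts; each window's GC content
--     # is then a prefix difference instead of a per-window count/slice.
--     seqLen = len(seq)
--     prefix = [0]
--     for ch in seq:
--         prefix.append(prefix[-1] + (1 if ch in "GC" else 0))
--     subseqGCContent = []
--     front = 0
--     while front < seqLen:
--         end = front + k
--         if end >= seqLen:
--             end = seqLen
--         subseqGCContent.append(round((prefix[end] - prefix[front]) / (end - front) * 100))
--         front += k
--     return subseqGCContent
-- ===== Notes on version B (the rewrite author's own statement) =====
-- stated objective: alternative
-- what changed: B precomputes a prefix array of G/C counts in one pass and obtains each window's count as a prefix difference, instead of A's per-window str.count calls and slicing via a helper.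
import Mathlib
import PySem

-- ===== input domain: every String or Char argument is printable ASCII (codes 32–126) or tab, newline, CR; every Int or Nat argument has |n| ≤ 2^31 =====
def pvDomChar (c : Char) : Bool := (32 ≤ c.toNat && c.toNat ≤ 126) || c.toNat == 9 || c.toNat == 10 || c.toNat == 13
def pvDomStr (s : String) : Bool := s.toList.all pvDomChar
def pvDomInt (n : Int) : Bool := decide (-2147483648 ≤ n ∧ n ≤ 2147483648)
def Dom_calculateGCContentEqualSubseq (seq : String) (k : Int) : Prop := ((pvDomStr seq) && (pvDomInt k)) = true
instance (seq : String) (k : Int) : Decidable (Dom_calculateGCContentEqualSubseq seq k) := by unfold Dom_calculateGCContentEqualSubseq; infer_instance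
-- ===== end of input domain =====

-- B replaces A's per-window str.count/slice helper by a one-pass prefix array of G/C counts
-- and a prefix-difference per window (objective: alternative decomposition, same cost).


-- Shared semantic primitive (used by BOTH ports, like a PySem built-in): an exact
-- integer model of Python's binary64 expression round(c / L * 100) for ints 0 ≤ c ≤ L,
-- 0 < L ≤ 2^31 (both sources evaluate exactly this expression): c/L is rounded to the
-- nearest double (round-half-even to 53-bit mantissa), multiplied by 100 and rounded to
-- the nearest double again, and round() takes the nearest int, ties to even.
def pvRheDiv (a b : Nat) : Nat :=
  let q := a / b; let r := a % b
  if 2*r < b then q else if b < 2*r then q+1 else if q % 2 = 0 then q else q+1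

-- smallest s with 2^52*L ≤ c*2^s (fuel 53+log2 L+2 always suffices since 1 ≤ c)
def pvFindS (c L : Nat) : Nat → Nat → Nat
  | 0, s => s
  | fuel+1, s => if 2^52 * L ≤ c * 2^s then s else pvFindS c L fuel (s+1)

def pyRound100 (c L : Int) : Int :=
  if c ≤ 0 ∨ L ≤ 0 then 0 else
    let cn := c.toNat; let Ln := L.toNat
    let s := pvFindS cn Ln (53 + Nat.log2 Ln + 2) 0
    let m := pvRheDiv (cn * 2^s) Ln          -- nearest double of c/L is m/2^s
    let t := 100 * m
    let B := Nat.log2 t + 1                  -- t.bit_length()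
    let n2 := if 53 < B then pvRheDiv t (2^(B-53)) * 2^(B-53) else t   -- nearest double of 100*(m/2^s) is n2/2^s
    ((pvRheDiv n2 (2^s) : Nat) : Int)

-- ===== PORT A =====
-- calculateGCContent(seq, start, end): seq.count("G",start,end)+seq.count("C",start,end)
-- counts in the slice seq[start:end] (single-char needles), divided by len(seq[start:end]).
def pvCalcGC (l : List Char) (start fin : Int) : Int :=
  pyRound100 (((PySem.List.slice l (some start) (some fin)).count 'G'
      + (PySem.List.slice l (some start) (some fin)).count 'C' : Nat) : Int)
    (((PySem.List.slice l (some start) (some fin)).length : Nat) : Int)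

def pvLoopA (l : List Char) (k : Int) : Nat → Int → List Int → List Int
  | 0, _, acc => acc
  | fuel+1, front, acc =>
    if front < (l.length : Int) then
      let e0 := front + k
      let e := if (l.length : Int) ≤ e0 then (l.length : Int) else e0
      pvLoopA l k fuel (front + k) (acc ++ [pvCalcGC l front e])
    else acc

def calculateGCContentEqualSubseq (seq : String) (k : Int) : List Int :=
  pvLoopA seq.toList k (seq.toList.length + 1) 0 []

-- ===== PORT B =====
-- prefix = [0]; for ch in seq: prefix.append(prefix[-1] + (1 if ch in "GC" else 0))
def pvPrefixLoop : List Char → List Int → List Int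
  | [], pr => pr
  | ch :: rest, pr =>
      pvPrefixLoop rest (pr ++ [PySem.List.pyGetD pr (-1) 0 + (if ch = 'G' ∨ ch = 'C' then 1 else 0)])

def pvLoopB (n : Int) (pr : List Int) (k : Int) : Nat → Int → List Int → List Int
  | 0, _, acc => acc
  | fuel+1, front, acc =>
    if front < n then
      let e0 := front + k
      let e := if n ≤ e0 then n else e0
      pvLoopB n pr k fuel (front + k)
        (acc ++ [pyRound100 (PySem.List.pyGetD pr e 0 - PySem.List.pyGetD pr front 0) (e - front)])
    else acc

def calculateGCContentEqualSubseq_alt (seq : String) (k : Int) : List Int :=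
  pvLoopB (seq.toList.length : Int) (pvPrefixLoop seq.toList [0]) k (seq.toList.length + 1) 0 []

-- ===== PRECONDITION & SPEC =====
-- A raises ZeroDivisionError on every nonempty seq with k ≤ 0 (some window is empty),
-- so Pre_ admits exactly the inputs on which A returns: empty seq, or k ≥ 1.
def Pre_calculateGCContentEqualSubseq (seq : String) (k : Int) : Prop :=
  seq.toList = [] ∨ 1 ≤ k
instance (seq : String) (k : Int) : Decidable (Pre_calculateGCContentEqualSubseq seq k) := by
  unfold Pre_calculateGCContentEqualSubseq; infer_instance

def pvWitness_calculateGCContentEqualSubseq : String × Int := ("GCATTG", 4)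

def Spec_calculateGCContentEqualSubseq (seq : String) (k : Int) (out : List Int) : Prop := out = calculateGCContentEqualSubseq_alt seq k
instance (seq : String) (k : Int) (out : List Int) : Decidable (Spec_calculateGCContentEqualSubseq seq k out) := by unfold Spec_calculateGCContentEqualSubseq; infer_instance

-- ===== CLAIM (what is proved, stated in full; the proofs are below) =====
def Claim_equal_calculateGCContentEqualSubseq : Prop := ∀ (seq : String) (k : Int), Dom_calculateGCContentEqualSubseq seq k → Pre_calculateGCContentEqualSubseq seq k → Spec_calculateGCContentEqualSubseq seq k (calculateGCContentEqualSubseq seq k)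

-- ===== LEMMAS AND PROOFS =====

-- countP form of the G/C predicate
def pvGC (t : List Char) : Int := (t.countP (fun ch => ch == 'G' || ch == 'C') : Nat)

theorem pv_count_eq_gc (t : List Char) :
    ((t.count 'G' + t.count 'C' : Nat) : Int) = pvGC t := by
  induction t with
  | nil => simp [pvGC]
  | cons c rest ih =>
    by_cases hG : c = 'G' <;> by_cases hC : c = 'C' <;>
      simp_all [pvGC] <;> omega

theorem pv_prefixLoop_eq (l : List Char) (pr : List Int) (a : Int) :
    pvPrefixLoop l (pr ++ [a]) =
      pr ++ [a] ++ (List.range l.length).map (fun i => a + pvGC (l.take (i+1))) := by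
  induction l generalizing pr a with
  | nil => simp [pvPrefixLoop]
  | cons ch rest ih =>
    simp only [pvPrefixLoop, PySem.List.pyGetD_neg_one_append_singleton]
    rw [ih (pr ++ [a]) (a + (if ch = 'G' ∨ ch = 'C' then 1 else 0))]
    simp only [List.length_cons, List.range_succ_eq_map, List.map_cons, List.map_map]
    have hmap : ∀ i, a + pvGC ((ch :: rest).take (i+1+1)) =
        (a + (if ch = 'G' ∨ ch = 'C' then 1 else 0)) + pvGC (rest.take (i+1)) := by
      intro i
      by_cases hG : ch = 'G' <;> by_cases hC : ch = 'C' <;>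
        simp_all [pvGC] <;> ring
    simp only [Function.comp_def]
    rw [List.map_congr_left (fun i _ => hmap i)]
    have h1 : pvGC [ch] = (if ch = 'G' ∨ ch = 'C' then 1 else 0) := by
      by_cases hG : ch = 'G' <;> by_cases hC : ch = 'C' <;> simp_all [pvGC]
    simp [h1, List.append_assoc]

-- prefix[i] for 0 ≤ i ≤ n is the G/C count of the first i characters
theorem pv_prefix_get (l : List Char) (i : Nat) (hi : i ≤ l.length) :
    PySem.List.pyGetD (pvPrefixLoop l [0]) (i : Int) 0 = pvGC (l.take i) := by
  have h := pv_prefixLoop_eq l [] 0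
  simp only [List.nil_append] at h
  rw [h, PySem.List.pyGetD_natCast]
  cases i with
  | zero => simp [pvGC]
  | succ j =>
    have hj : j < l.length := by omega
    rw [List.getD_eq_getElem?_getD]
    simp [hj]

-- the per-window values agree
theorem pv_window_eq (l : List Char) (f en : Nat) (hfe : f ≤ en) (hen : en ≤ l.length) :
    pvCalcGC l (f : Int) (en : Int) =
      pyRound100 (PySem.List.pyGetD (pvPrefixLoop l [0]) (en : Int) 0 -
                  PySem.List.pyGetD (pvPrefixLoop l [0]) (f : Int) 0) ((en : Int) - (f : Int)) := by
  rw [pv_prefix_get l f (le_trans hfe hen), pv_prefix_get l en hen]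
  unfold pvCalcGC
  rw [PySem.List.slice_natCast]
  have hsub : (l.drop f).take (en - f) = (l.take en).drop f := by
    rw [List.drop_take]
  have hlen : ((l.drop f).take (en - f)).length = en - f := by
    simp [List.length_take, List.length_drop]; omega
  have hsplit : l.take en = l.take f ++ (l.take en).drop f := by
    conv_lhs => rw [← List.take_append_drop f (l.take en)]
    rw [List.take_take, Nat.min_eq_left hfe]
  have hcnt : pvGC (l.take en) - pvGC (l.take f) = pvGC ((l.drop f).take (en - f)) := by
    rw [hsub]
    conv_lhs => rw [hsplit]
    simp [pvGC, List.countP_append]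
  rw [pv_count_eq_gc, hcnt, hlen]
  congr 1
  push_cast [Nat.cast_sub hfe]
  ring_nf

-- the two loops agree step by step (k ≥ 1, front a nonnegative int)
theorem pv_loops_eq (l : List Char) (k : Int) (hk : 1 ≤ k) :
    ∀ (fuel : Nat) (f : Nat) (acc : List Int),
      pvLoopA l k fuel (f : Int) acc =
        pvLoopB (l.length : Int) (pvPrefixLoop l [0]) k fuel (f : Int) acc := by
  intro fuel
  induction fuel with
  | zero => intro f acc; rfl
  | succ m ih =>
    intro f acc
    simp only [pvLoopA, pvLoopB]
    by_cases hlt : (f : Int) < (l.length : Int)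
    · simp only [hlt, if_pos]
      by_cases hcl : (l.length : Int) ≤ (f : Int) + k
      · -- clamped window: end = length
        simp only [hcl, if_pos]
        have hw := pv_window_eq l f l.length (by exact_mod_cast le_of_lt hlt) le_rfl
        rw [hw]
        have : (f : Int) + k = ((f + k.toNat : Nat) : Int) := by push_cast; omega
        rw [this, ih]
      · simp only [hcl, if_neg, not_false_iff]
        have hfk : (f : Int) + k = ((f + k.toNat : Nat) : Int) := by push_cast; omega
        have hw := pv_window_eq l f (f + k.toNat)
          (by omega) (by omega)
        rw [hfk, hw, ih]
    · simp only [hlt, if_neg, not_false_iff]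
-- ===== VERDICT (by name: the statement is the Claim_ definition above) =====
theorem calculateGCContentEqualSubseq_spec : Claim_equal_calculateGCContentEqualSubseq := by
  intro seq k _ hpre
  unfold Spec_calculateGCContentEqualSubseq
  unfold calculateGCContentEqualSubseq calculateGCContentEqualSubseq_alt
  rcases hpre with h0 | hk
  · simp [h0, pvLoopA, pvLoopB]
  · exact_mod_cast pv_loops_eq seq.toList k hk (seq.toList.length + 1) 0 []
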